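-- pv_equiv track=rewrite | github.com/addy118/tcet-practicals | operating-systems/os-exp-2/fcfs.py | get_ct
-- ===== SOURCE A (Python) =====
-- pid = [1, 2, 3, 4]
--
-- def get_ct(at, bt):
--     ct = []
--
--     for i in range(len(pid)):
--         if i == 0:
--             ct.append(at[i] + bt[i])
--         else:
--             ct.append(ct[i-1] + bt[i])
--
--     return ct
-- ===== SOURCE B (Python) =====
-- pid = [1, 2, 3, 4]
--
-- def get_ct(at, bt):
--     # closed form: completion time i = first arrival + prefix sum of burst times
--     return [at[0] + sum(bt[:i]) + bt[i] for i in range(len(pid))]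
-- ===== Notes on version B (the rewrite author's own statement) =====
-- stated objective: simpler
-- what changed: Replaces the stateful loop that reads back ct[i-1] from the output list with a closed-form prefix-sum comprehension: ct[i] = at[0] + sum(bt[:i+1]).
import Mathlib
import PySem

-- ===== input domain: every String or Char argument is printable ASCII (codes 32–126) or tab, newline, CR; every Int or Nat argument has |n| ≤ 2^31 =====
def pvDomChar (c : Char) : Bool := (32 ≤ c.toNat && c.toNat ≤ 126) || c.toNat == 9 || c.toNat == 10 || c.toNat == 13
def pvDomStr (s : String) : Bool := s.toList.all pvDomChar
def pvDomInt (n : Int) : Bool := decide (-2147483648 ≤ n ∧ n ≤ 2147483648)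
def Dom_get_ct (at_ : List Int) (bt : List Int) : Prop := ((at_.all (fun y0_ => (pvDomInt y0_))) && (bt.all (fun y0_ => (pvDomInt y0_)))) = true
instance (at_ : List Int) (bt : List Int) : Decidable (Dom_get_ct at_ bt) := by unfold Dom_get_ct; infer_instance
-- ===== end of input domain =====

-- B replaces A's loop that reads ct[i-1] back from the output list with a
-- closed-form prefix-sum comprehension ct[i] = at[0] + sum(bt[:i+1]) (objective: simpler).

-- ===== PORT A =====
def pid : List Int := [1, 2, 3, 4]

def get_ct (at_ : List Int) (bt : List Int) : List Int :=
  (PySem.List.pyRange 0 (PySem.List.len pid) 1).foldl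
    (fun ct i =>
      if i == 0 then
        ct ++ [PySem.List.pyGetD at_ i 0 + PySem.List.pyGetD bt i 0]
      else
        ct ++ [PySem.List.pyGetD ct (i - 1) 0 + PySem.List.pyGetD bt i 0]) []

-- ===== PORT B =====
def get_ct_alt (at_ : List Int) (bt : List Int) : List Int :=
  (PySem.List.pyRange 0 (PySem.List.len pid) 1).map
    (fun i => PySem.List.pyGetD at_ 0 0 + (PySem.List.slice bt none (some i)).sum + PySem.List.pyGetD bt i 0)

-- ===== PRECONDITION & SPEC =====
-- A indexes at[0] and bt[0..3] (len(pid) = 4): it raises IndexError unless at is nonempty and bt has ≥ 4 elements.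
def Pre_get_ct (at_ : List Int) (bt : List Int) : Prop := at_ ≠ [] ∧ 4 ≤ bt.length
instance (at_ : List Int) (bt : List Int) : Decidable (Pre_get_ct at_ bt) := by unfold Pre_get_ct; infer_instance
def pvWitness_get_ct : List Int × List Int := ([0], [3, 1, 2, 4])

def Spec_get_ct (at_ : List Int) (bt : List Int) (out : List Int) : Prop := out = get_ct_alt at_ bt
instance (at_ : List Int) (bt : List Int) (out : List Int) : Decidable (Spec_get_ct at_ bt out) := by unfold Spec_get_ct; infer_instance

-- ===== CLAIM (what is proved, stated in full; the proofs are below) =====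
def Claim_equal_get_ct : Prop := ∀ (at_ : List Int) (bt : List Int), Dom_get_ct at_ bt → Pre_get_ct at_ bt → Spec_get_ct at_ bt (get_ct at_ bt)

-- ===== LEMMAS AND PROOFS =====

-- ===== VERDICT =====
theorem get_ct_spec : Claim_equal_get_ct := by
  intro at_ bt _ hpre
  obtain ⟨ha, hb⟩ := hpre
  unfold Spec_get_ct
  match at_, bt with
  | a0 :: at', b0 :: b1 :: b2 :: b3 :: bt' =>
    simp [get_ct, get_ct_alt, pid, PySem.List.pyRange, PySem.List.len,
      PySem.List.pyGetD, PySem.List.pyGet?, PySem.List.pyIdx?, PySem.List.slice,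
      PySem.List.clampIdx, List.range_succ]
    split_ifs <;> first | (exfalso; omega) | (simp_all; try constructor) <;> try ring
  | [], _ => exact absurd rfl ha
  | _ :: _, [] => simp at hb
  | _ :: _, [_] => simp at hb
  | _ :: _, [_, _] => simp at hb
  | _ :: _, [_, _, _] => simp at hb
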